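-- pv_equiv track=rewrite | github.com/MrBrantCode/unitest_baseline | mut_generate/mist_train_taco/taco_11922/solution.py | maximize_total_significance
-- ===== SOURCE A (Python) =====
-- def maximize_total_significance(n, m, d, physics_cups, informatics_cups):
--     # Convert widths to negative to facilitate sorting by significance first, then by width
--     for i in range(n):
--         physics_cups[i][1] = -physics_cups[i][1]
--     for i in range(m):
--         informatics_cups[i][1] = -informatics_cups[i][1]
--
--     # Sort cups by significance in descending order, then by width in ascending order
--     physics_cups.sort(reverse=True)
--     informatics_cups.sort(reverse=True)
--
--     # Initialize variables
--     total_significance = 0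
--     total_width = 0
--
--     # Add all informatics cups to the shelf
--     for cup in informatics_cups:
--         total_significance += cup[0]
--         total_width -= cup[1]  # Subtract because widths are negative
--
--     # Initialize answer
--     max_significance = 0
--     z = m - 1
--
--     # Try adding physics cups to the shelf
--     for cup in physics_cups:
--         total_significance += cup[0]
--         total_width -= cup[1]  # Subtract because widths are negative
--
--         # Remove the least significant informatics cup if the width exceeds the shelf's capacity
--         while z >= 0 and total_width > d:
--             total_significance -= informatics_cups[z][0]
--             total_width += informatics_cups[z][1]  # Add because widths are negative
--             z -= 1
--
--         # If the current configuration fits within the shelf's width, update the maximum significance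
--         if total_width <= d:
--             max_significance = max(max_significance, total_significance)
--
--     return max_significance
-- ===== SOURCE B (Python) =====
-- def maximize_total_significance(n, m, d, physics_cups, informatics_cups):
--     # Note: mutates its arguments (widths of the first n/m cups negated in place,
--     # both lists reverse-sorted).
--     for i in range(n):
--         physics_cups[i][1] = -physics_cups[i][1]
--     for i in range(m):
--         informatics_cups[i][1] = -informatics_cups[i][1]
--     physics_cups.sort(reverse=True)
--     informatics_cups.sort(reverse=True)
--
--     # Physics prefix widths.
--     phys_w = []
--     w = 0
--     for cup in physics_cups:
--         w -= cup[1]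
--         phys_w.append(w)
--
--     # Width and significance of the fully loaded shelf.
--     shelf = 0
--     sig = 0
--     for cup in informatics_cups:
--         shelf -= cup[1]
--         sig += cup[0]
--
--     # Event pass: for each removable informatics cup, least significant first,
--     # the physics prefix at which it has to leave the shelf.
--     events = []
--     j = 0
--     k = m
--     load = shelf
--     while k > 0:
--         while j < len(phys_w) and phys_w[j] + load <= d:
--             j += 1
--         if j == len(phys_w):
--             break
--         k -= 1
--         cup = informatics_cups[k]
--         events.append((j, cup[0], -cup[1]))
--         load += cup[1]
--
--     # Replay: walk the physics prefixes, dropping informatics cups at their events.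
--     best = 0
--     ps = 0
--     e = 0
--     for i, cup in enumerate(physics_cups):
--         ps += cup[0]
--         while e < len(events) and events[e][0] == i:
--             sig -= events[e][1]
--             shelf -= events[e][2]
--             e += 1
--         if phys_w[i] + shelf <= d:
--             best = max(best, ps + sig)
--     return best
-- ===== Notes on version B (the rewrite author's own statement) =====
-- stated objective: alternative
-- what changed: B keeps A's caller-visible preprocessing (in-place width negation and the two reverse-sorts) but inverts the loop structure: instead of A's single fused physics loop carrying running significance/width totals with an inner removal pointer into the informatics list, B precomputes the physics prefix widths, generates an explicit removal-event list (outer loop over informatics cups, inner pointer advancing over physics prefixes), and then replays those events while scanning the physics prefixes to take the best feasible total.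
import Mathlib
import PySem

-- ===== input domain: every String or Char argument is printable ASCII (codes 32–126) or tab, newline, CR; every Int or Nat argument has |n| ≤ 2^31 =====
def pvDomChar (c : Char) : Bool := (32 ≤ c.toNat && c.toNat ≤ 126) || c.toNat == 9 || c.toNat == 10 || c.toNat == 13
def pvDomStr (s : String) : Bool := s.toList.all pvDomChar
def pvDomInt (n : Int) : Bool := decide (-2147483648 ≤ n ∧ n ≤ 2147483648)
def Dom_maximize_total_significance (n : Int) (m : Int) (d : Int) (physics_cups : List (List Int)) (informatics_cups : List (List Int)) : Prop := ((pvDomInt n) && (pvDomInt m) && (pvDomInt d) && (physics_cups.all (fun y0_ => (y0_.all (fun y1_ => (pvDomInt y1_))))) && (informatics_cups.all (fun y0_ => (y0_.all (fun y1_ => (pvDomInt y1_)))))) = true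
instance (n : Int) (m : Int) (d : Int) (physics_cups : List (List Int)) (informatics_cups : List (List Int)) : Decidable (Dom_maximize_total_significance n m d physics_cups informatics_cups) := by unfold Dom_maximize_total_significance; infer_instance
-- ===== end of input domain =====

-- B keeps the caller-visible mutation (the same preprocessing: widths of the first n/m cups negated
-- in place, both lists reverse-sorted) but inverts A's loop structure: instead of A's fused physics
-- loop with an inner removal pointer, B precomputes physics prefix widths, generates the list of
-- removal events (outer loop over informatics cups, inner pointer over physics prefixes), and then
-- replays the events over the physics prefixes ("alternative"). Both programs mutate their list
-- arguments identically; the theorems below are about the return value.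

-- ===== PORT A =====
-- cup[0] / cup[1] (exact under Pre_: every cup has length ≥ 2)
def pvC0 (c : List Int) : Int := c.getD 0 0
def pvC1 (c : List Int) : Int := c.getD 1 0

-- 'for i in range(k): l[i][1] = -l[i][1]'  (exact under Pre_: k ≤ len(l) and cups have length ≥ 2)
def pvNegW (l : List (List Int)) (k : Int) : List (List Int) :=
  (PySem.List.pyRange 0 k 1).foldl
    (fun acc i => acc.set i.toNat ((acc.getD i.toNat []).set 1 (-(pvC1 (acc.getD i.toNat []))))) l

-- 'l.sort(reverse=True)' on lists of int lists (lexicographic comparison, as Python's)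
def pvSortRev (l : List (List Int)) : List (List Int) := PySem.List.sorted l (fun c => c) true

-- A's inner 'while z >= 0 and total_width > d' loop
def pvDropA (q : List (List Int)) (d : Int) (ts tw z : Int) : Int × Int × Int :=
  if h : 0 ≤ z ∧ tw > d then
    pvDropA q d (ts - pvC0 (q.getD z.toNat [])) (tw + pvC1 (q.getD z.toNat [])) (z - 1)
  else (ts, tw, z)
termination_by (z + 1).toNat
decreasing_by omega

-- A's physics loop body (state: total_significance, total_width, z, max_significance)
def pvStepA (q : List (List Int)) (d : Int) (st : Int × Int × Int × Int) (cup : List Int) :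
    Int × Int × Int × Int :=
  let ts := st.1 + pvC0 cup
  let tw := st.2.1 - pvC1 cup
  let r := pvDropA q d ts tw st.2.2.1
  (r.1, r.2.1, r.2.2, if r.2.1 ≤ d then max st.2.2.2 r.1 else st.2.2.2)

-- A after preprocessing: informatics totals, then the fused physics loop
def pvRunA (d m : Int) (phys info : List (List Int)) : Int :=
  let init := info.foldl (fun p cup => (p.1 + pvC0 cup, p.2 - pvC1 cup)) ((0 : Int), (0 : Int))
  (phys.foldl (pvStepA info d) (init.1, init.2, m - 1, 0)).2.2.2

def maximize_total_significance (n : Int) (m : Int) (d : Int) (physics_cups : List (List Int)) (informatics_cups : List (List Int)) : Int :=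
  pvRunA d m (pvSortRev (pvNegW physics_cups n)) (pvSortRev (pvNegW informatics_cups m))

-- ===== PORT B =====
-- B's inner 'while j < len(phys_w) and phys_w[j] + load <= d: j += 1'
def pvAdvance (W : List Int) (d load : Int) (j : Int) : Int :=
  if h : j < (W.length : Int) ∧ PySem.List.pyGetD W j 0 + load ≤ d then
    pvAdvance W d load (j + 1)
  else j
termination_by ((W.length : Int) - j).toNat
decreasing_by omega

-- B's event pass: 'while k > 0: …advance j…; if j == len: break; k -= 1; record; load += cup[1]'
def pvEvents (W : List Int) (q : List (List Int)) (d : Int) (j k load : Int) :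
    List (Int × Int × Int) :=
  if hk : 0 < k then
    let j' := pvAdvance W d load j
    if j' = (W.length : Int) then []
    else
      let cup := q.getD (k - 1).toNat []
      (j', pvC0 cup, -(pvC1 cup)) :: pvEvents W q d j' (k - 1) (load + pvC1 cup)
  else []
termination_by k.toNat
decreasing_by omega

-- B's replay inner 'while e < len(events) and events[e][0] == i'
def pvConsume (ev : List (Int × Int × Int)) (i : Int) (e sg sh : Int) : Int × Int × Int :=
  if h : e < (ev.length : Int) ∧ (PySem.List.pyGetD ev e (0, 0, 0)).1 = i then
    pvConsume ev i (e + 1) (sg - (PySem.List.pyGetD ev e (0, 0, 0)).2.1)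
      (sh - (PySem.List.pyGetD ev e (0, 0, 0)).2.2)
  else (e, sg, sh)
termination_by ((ev.length : Int) - e).toNat
decreasing_by omega

-- B's replay loop body (state: best, ps, e, sig, shelf)
def pvReplay (W : List Int) (ev : List (Int × Int × Int)) (d : Int)
    (st : Int × Int × Int × Int × Int) (x : Int × List Int) : Int × Int × Int × Int × Int :=
  let ps := st.2.1 + pvC0 x.2
  let r := pvConsume ev x.1 st.2.2.1 st.2.2.2.1 st.2.2.2.2
  (if PySem.List.pyGetD W x.1 0 + r.2.2 ≤ d then max st.1 (ps + r.2.1) else st.1,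
   ps, r.1, r.2.1, r.2.2)

-- B after preprocessing: prefix widths, full-shelf totals, event pass, replay pass
def pvRunB (d m : Int) (phys info : List (List Int)) : Int :=
  let W := (phys.foldl (fun st cup => (st.1 ++ [st.2 - pvC1 cup], st.2 - pvC1 cup))
      (([] : List Int), (0 : Int))).1
  let sw := info.foldl (fun p cup => (p.1 - pvC1 cup, p.2 + pvC0 cup)) ((0 : Int), (0 : Int))
  let ev := pvEvents W info d 0 m sw.1
  ((PySem.List.enumerate phys 0).foldl (pvReplay W ev d) (0, 0, 0, sw.2, sw.1)).1

def maximize_total_significance_alt (n : Int) (m : Int) (d : Int) (physics_cups : List (List Int)) (informatics_cups : List (List Int)) : Int :=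
  pvRunB d m (pvSortRev (pvNegW physics_cups n)) (pvSortRev (pvNegW informatics_cups m))

-- ===== PRECONDITION & SPEC =====
-- Exactly the inputs where the Python A returns: the negation loops need n ≤ len(physics_cups) and
-- m ≤ len(informatics_cups) (IndexError otherwise), and every cup is read at indices 0 and 1.
def Pre_maximize_total_significance (n : Int) (m : Int) (d : Int) (physics_cups : List (List Int)) (informatics_cups : List (List Int)) : Prop :=
  n ≤ (physics_cups.length : Int) ∧ m ≤ (informatics_cups.length : Int) ∧
  (∀ c ∈ physics_cups, 2 ≤ c.length) ∧ (∀ c ∈ informatics_cups, 2 ≤ c.length)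
instance (n : Int) (m : Int) (d : Int) (physics_cups : List (List Int)) (informatics_cups : List (List Int)) : Decidable (Pre_maximize_total_significance n m d physics_cups informatics_cups) := by unfold Pre_maximize_total_significance; infer_instance

def pvWitness_maximize_total_significance : Int × Int × Int × List (List Int) × List (List Int) :=
  (1, 1, 5, [[3, 2]], [[4, 1]])

def Spec_maximize_total_significance (n : Int) (m : Int) (d : Int) (physics_cups : List (List Int)) (informatics_cups : List (List Int)) (out : Int) : Prop := out = maximize_total_significance_alt n m d physics_cups informatics_cups
instance (n : Int) (m : Int) (d : Int) (physics_cups : List (List Int)) (informatics_cups : List (List Int)) (out : Int) : Decidable (Spec_maximize_total_significance n m d physics_cups informatics_cups out) := by unfold Spec_maximize_total_significance; infer_instance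

-- ===== CLAIM (what is proved, stated in full; the proofs are below) =====
def Claim_equal_maximize_total_significance : Prop := ∀ (n : Int) (m : Int) (d : Int) (physics_cups : List (List Int)) (informatics_cups : List (List Int)), Dom_maximize_total_significance n m d physics_cups informatics_cups → Pre_maximize_total_significance n m d physics_cups informatics_cups → Spec_maximize_total_significance n m d physics_cups informatics_cups (maximize_total_significance n m d physics_cups informatics_cups)

-- ===== LEMMAS AND PROOFS =====

def pvSig (q : List (List Int)) : Int := (q.map pvC0).sum
def pvWid (q : List (List Int)) : Int := (q.map pvC1).sum

-- A's informatics-totals loop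
lemma pvSum2 (q : List (List Int)) (a b : Int) :
    q.foldl (fun p cup => (p.1 + pvC0 cup, p.2 - pvC1 cup)) (a, b) = (a + pvSig q, b - pvWid q) := by
  induction q generalizing a b with
  | nil => simp [pvSig, pvWid]
  | cons c t ih =>
    simp only [List.foldl_cons, ih, pvSig, pvWid, List.map_cons, List.sum_cons, Prod.mk.injEq]
    constructor <;> ring

-- B's full-shelf totals loop
lemma pvSum2B (q : List (List Int)) (a b : Int) :
    q.foldl (fun p cup => (p.1 - pvC1 cup, p.2 + pvC0 cup)) (a, b) = (a - pvWid q, b + pvSig q) := by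
  induction q generalizing a b with
  | nil => simp [pvSig, pvWid]
  | cons c t ih =>
    simp only [List.foldl_cons, ih, pvSig, pvWid, List.map_cons, List.sum_cons, Prod.mk.injEq]
    constructor <;> ring

-- prefix widths: the value of B's phys_w building loop
def pvPW (phys : List (List Int)) (i : Nat) : Int := -(((phys.take i).map pvC1).sum)

lemma pvW_build (phys : List (List Int)) :
    ∀ (acc : List Int) (w : Int),
      (phys.foldl (fun st cup => (st.1 ++ [st.2 - pvC1 cup], st.2 - pvC1 cup)) (acc, w)).1
      = acc ++ (List.range phys.length).map (fun i => w - ((phys.take (i + 1)).map pvC1).sum) := by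
  induction phys with
  | nil => intro acc w; simp
  | cons c t ih =>
    intro acc w
    rw [List.foldl_cons, ih, List.length_cons, List.range_succ_eq_map, List.map_cons,
      List.map_map]
    have hf : (List.range t.length).map (fun i => (w - pvC1 c) - ((t.take (i + 1)).map pvC1).sum)
        = (List.range t.length).map
            ((fun i => w - (((c :: t).take (i + 1)).map pvC1).sum) ∘ Nat.succ) := by
      apply List.map_congr_left
      intro i _
      simp only [Function.comp_apply, List.take_succ_cons, List.map_cons, List.sum_cons]
      ring
    rw [hf, List.append_assoc, List.singleton_append]
    congr 2
    simp

lemma pvW_getD (phys : List (List Int)) (i : Nat) (hi : i < phys.length) :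
    PySem.List.pyGetD
      ((phys.foldl (fun st cup => (st.1 ++ [st.2 - pvC1 cup], st.2 - pvC1 cup))
        (([] : List Int), (0 : Int))).1) ((i : Nat) : Int) 0 = pvPW phys (i + 1) := by
  rw [pvW_build, List.nil_append, PySem.List.pyGetD_natCast,
    PySem.List.getD_map_range (fun j => 0 - ((phys.take (j + 1)).map pvC1).sum)
      phys.length i 0 hi]
  unfold pvPW
  ring

lemma pvW_len (phys : List (List Int)) :
    ((phys.foldl (fun st cup => (st.1 ++ [st.2 - pvC1 cup], st.2 - pvC1 cup))
      (([] : List Int), (0 : Int))).1).length = phys.length := by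
  rw [pvW_build, List.nil_append, List.length_map, List.length_range]

lemma pvPW_succ (phys : List (List Int)) (i : Nat) (hi : i < phys.length) :
    pvPW phys (i + 1) = pvPW phys i - pvC1 (phys.getD i []) := by
  unfold pvPW
  rw [List.map_take, List.map_take, List.sum_take_succ (phys.map pvC1) i (by simpa using hi)]
  simp [List.getD_eq_getElem?_getD, List.getElem?_map, List.getElem?_eq_getElem hi]
  ring

-- the advance pointer never moves backwards
lemma pvAdvance_ge (W : List Int) (d load j : Int) : j ≤ pvAdvance W d load j := by
  rw [pvAdvance]
  split_ifs with h
  · have := pvAdvance_ge W d load (j + 1)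
    omega
  · exact le_refl j
termination_by ((W.length : Int) - j).toNat
decreasing_by omega

-- every recorded event lies at or after the starting pointer
lemma pvEvents_ge (W : List Int) (q : List (List Int)) (d : Int) :
    ∀ (kn : Nat) (k : Int), k.toNat = kn → ∀ (j load : Int) (x : Int × Int × Int),
      x ∈ pvEvents W q d j k load → j ≤ x.1 := by
  intro kn
  induction kn with
  | zero =>
    intro k hk j load x hx
    rw [pvEvents, dif_neg (by omega)] at hx
    exact absurd hx (List.not_mem_nil)
  | succ n ih =>
    intro k hk j load x hx
    rw [pvEvents, dif_pos (by omega : 0 < k)] at hx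
    by_cases hj : pvAdvance W d load j = (W.length : Int)
    · rw [if_pos hj] at hx
      exact absurd hx (List.not_mem_nil)
    · rw [if_neg hj] at hx
      rcases List.mem_cons.mp hx with h | h
      · subst h
        exact pvAdvance_ge W d load j
      · have h1 := ih (k - 1) (by omega) (pvAdvance W d load j) _ x h
        have h2 := pvAdvance_ge W d load j
        omega

-- if the current prefix still fits, the advance pointer skips it
lemma pvAdvance_skip (W : List Int) (d load j : Int)
    (hj : j < (W.length : Int)) (hfit : PySem.List.pyGetD W j 0 + load ≤ d) :
    pvAdvance W d load j = pvAdvance W d load (j + 1) := by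
  rw [pvAdvance, dif_pos ⟨hj, hfit⟩]

-- pvEvents only looks at its pointer through pvAdvance
lemma pvEvents_congr_j (W : List Int) (q : List (List Int)) (d : Int) (k load j₁ j₂ : Int)
    (h : pvAdvance W d load j₁ = pvAdvance W d load j₂) :
    pvEvents W q d j₁ k load = pvEvents W q d j₂ k load := by
  rw [pvEvents, pvEvents, h]

-- if the current prefix overflows, the advance pointer stops on it
lemma pvAdvance_stop (W : List Int) (d load j : Int)
    (hfit : ¬ PySem.List.pyGetD W j 0 + load ≤ d) :
    pvAdvance W d load j = j := by
  rw [pvAdvance, dif_neg (by tauto)]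

-- THE CRUX: at one physics prefix, A's drop loop, B's event generation and B's event
-- consumption perform the same removals in the same order.
lemma pvDC (W : List Int) (q : List (List Int)) (d : Int) (i : Nat)
    (hi : (i : Int) < (W.length : Int)) (wi : Int)
    (hwi : PySem.List.pyGetD W ((i : Nat) : Int) 0 = wi) :
    ∀ (kn : Nat) (k : Int), k.toNat = kn → ∀ (sg sh : Int),
    ∃ (k' sg' sh' : Int) (evAt : List (Int × Int × Int)),
      pvEvents W q d ((i : Nat) : Int) k sh = evAt ++ pvEvents W q d (((i : Nat) : Int) + 1) k' sh' ∧
      (∀ S : Int, pvDropA q d (S + sg) (wi + sh) (k - 1) = (S + sg', wi + sh', k' - 1)) ∧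
      (∀ (c rest : List (Int × Int × Int)), (∀ x ∈ rest, x.1 ≠ ((i : Nat) : Int)) →
        pvConsume (c ++ (evAt ++ rest)) ((i : Nat) : Int) ((c.length : Nat) : Int) sg sh
          = (((c.length : Nat) : Int) + ((evAt.length : Nat) : Int), sg', sh')) := by
  intro kn
  induction kn with
  | zero =>
    intro k hk sg sh
    refine ⟨k, sg, sh, [], ?_, ?_, ?_⟩
    · rw [pvEvents, dif_neg (by omega), pvEvents, dif_neg (by omega)]
      rfl
    · intro S
      rw [pvDropA, dif_neg (by omega)]
    · intro c rest hrest
      rw [pvConsume]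
      rw [dif_neg ?_]
      · simp
      · rintro ⟨h1, h2⟩
        rw [List.nil_append] at h1 h2
        rcases rest with _ | ⟨x, rest'⟩
        · simp at h1
        · rw [PySem.List.pyGetD_natCast] at h2
          rw [List.getD_append_right _ _ _ _ (le_refl _), Nat.sub_self, List.getD_cons_zero] at h2
          exact hrest x (List.mem_cons_self) h2
  | succ n ih =>
    intro k hk sg sh
    have hk0 : 0 < k := by omega
    by_cases hfit : PySem.List.pyGetD W ((i : Nat) : Int) 0 + sh ≤ d
    · -- no removal at this prefix
      refine ⟨k, sg, sh, [], ?_, ?_, ?_⟩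
      · rw [List.nil_append]
        exact pvEvents_congr_j W q d k sh _ _ (pvAdvance_skip W d sh _ hi hfit)
      · intro S
        rw [pvDropA, dif_neg (by rw [hwi] at hfit; omega)]
      · intro c rest hrest
        rw [pvConsume]
        rw [dif_neg ?_]
        · simp
        · rintro ⟨h1, h2⟩
          rw [List.nil_append] at h1 h2
          rcases rest with _ | ⟨x, rest'⟩
          · simp at h1
          · rw [PySem.List.pyGetD_natCast] at h2
            rw [List.getD_append_right _ _ _ _ (le_refl _), Nat.sub_self, List.getD_cons_zero] at h2
            exact hrest x (List.mem_cons_self) h2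
    · -- the cup at level k - 1 is removed at this prefix
      obtain ⟨k', sg', sh', evAt, hev, hdrop, hcons⟩ :=
        ih (k - 1) (by omega) (sg - pvC0 (q.getD (k - 1).toNat []))
          (sh + pvC1 (q.getD (k - 1).toNat []))
      refine ⟨k', sg', sh',
        (((i : Nat) : Int), pvC0 (q.getD (k - 1).toNat []), -(pvC1 (q.getD (k - 1).toNat []))) :: evAt,
        ?_, ?_, ?_⟩
      · rw [pvEvents, dif_pos hk0, pvAdvance_stop W d sh _ hfit, if_neg (by omega),
          List.cons_append]
        exact congrArg (List.cons _) hev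
      · intro S
        rw [pvDropA, dif_pos (by rw [hwi] at hfit; constructor <;> omega)]
        have e1 : S + sg - pvC0 (q.getD (k - 1).toNat [])
            = S + (sg - pvC0 (q.getD (k - 1).toNat [])) := by ring
        have e2 : wi + sh + pvC1 (q.getD (k - 1).toNat [])
            = wi + (sh + pvC1 (q.getD (k - 1).toNat [])) := by ring
        have e3 : k - 1 - 1 = (k - 1) - 1 := rfl
        rw [e1, e2, e3, hdrop S]
      · intro c rest hrest
        rw [pvConsume]
        have hget : PySem.List.pyGetD
            (c ++ ((((i : Nat) : Int), pvC0 (q.getD (k - 1).toNat []),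
              -(pvC1 (q.getD (k - 1).toNat []))) :: evAt ++ rest))
            ((c.length : Nat) : Int) ((0 : Int), (0 : Int), (0 : Int))
            = (((i : Nat) : Int), pvC0 (q.getD (k - 1).toNat []),
               -(pvC1 (q.getD (k - 1).toNat []))) := by
          rw [PySem.List.pyGetD_natCast, List.getD_append_right _ _ _ _ (le_refl _), Nat.sub_self]
          rfl
        rw [dif_pos ?_]
        · rw [hget]
          have hassoc : c ++ ((((i : Nat) : Int), pvC0 (q.getD (k - 1).toNat []),
              -(pvC1 (q.getD (k - 1).toNat []))) :: evAt ++ rest)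
              = (c ++ [(((i : Nat) : Int), pvC0 (q.getD (k - 1).toNat []),
                -(pvC1 (q.getD (k - 1).toNat [])))]) ++ (evAt ++ rest) := by
            simp
          have hlen : ((c.length : Nat) : Int) + 1
              = (((c ++ [(((i : Nat) : Int), pvC0 (q.getD (k - 1).toNat []),
                -(pvC1 (q.getD (k - 1).toNat [])))]).length : Nat) : Int) := by
            simp
          have harith1 : sg - (((i : Nat) : Int), pvC0 (q.getD (k - 1).toNat []),
              -(pvC1 (q.getD (k - 1).toNat []))).2.1 = sg - pvC0 (q.getD (k - 1).toNat []) := rfl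
          have harith2 : sh - (((i : Nat) : Int), pvC0 (q.getD (k - 1).toNat []),
              -(pvC1 (q.getD (k - 1).toNat []))).2.2 = sh + pvC1 (q.getD (k - 1).toNat []) := by
            simp only []
            ring
          rw [harith1, harith2, hassoc, hlen, hcons _ rest hrest]
          simp only [List.length_append, List.length_cons, List.length_nil]
          congr 1
          push_cast
          ring
        · constructor
          · simp only [List.length_append, List.length_cons, List.length_append]
            push_cast
            omega
          · rw [hget]


-- the main simulation: A's fused loop equals B's replay of the precomputed events
lemma pvMain (q : List (List Int)) (d : Int) (phys : List (List Int)) (W : List Int)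
    (hWlen : W.length = phys.length)
    (hW : ∀ (i : Nat), i < phys.length → PySem.List.pyGetD W ((i : Nat) : Int) 0 = pvPW phys (i + 1)) :
    ∀ (t : List (List Int)) (i : Nat), t = phys.drop i →
    ∀ (k sg sh ps best : Int) (c : List (Int × Int × Int)),
      (t.foldl (pvStepA q d) (ps + sg, pvPW phys i + sh, k - 1, best)).2.2.2
      = ((PySem.List.enumerate t ((i : Nat) : Int)).foldl
          (pvReplay W (c ++ pvEvents W q d ((i : Nat) : Int) k sh) d)
          (best, ps, ((c.length : Nat) : Int), sg, sh)).1 := by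
  intro t
  induction t with
  | nil => intro i ht k sg sh ps best c; rfl
  | cons cup t' ih =>
    intro i ht k sg sh ps best c
    have hi : i < phys.length := by
      by_contra hcon
      rw [List.drop_eq_nil_of_le (by omega)] at ht
      exact List.cons_ne_nil _ _ ht
    have hpair : cup :: t' = phys[i] :: phys.drop (i + 1) :=
      ht.trans (List.drop_eq_getElem_cons hi)
    obtain ⟨hcupE, ht'⟩ := List.cons_eq_cons.mp hpair
    have hcup : phys.getD i [] = cup := by
      rw [List.getD_eq_getElem?_getD, List.getElem?_eq_getElem hi, hcupE]
      rfl
    obtain ⟨k', sg', sh', evAt, hev, hdrop, hcons⟩ :=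
      pvDC W q d i (by rw [hWlen]; exact_mod_cast hi) (pvPW phys (i + 1))
        (hW i hi) k.toNat k rfl sg (sh)
    -- A side, one step
    rw [List.foldl_cons]
    have hstA : pvStepA q d (ps + sg, pvPW phys i + sh, k - 1, best) cup
        = (ps + pvC0 cup + sg', pvPW phys (i + 1) + sh', k' - 1,
           if pvPW phys (i + 1) + sh' ≤ d then max best (ps + pvC0 cup + sg') else best) := by
      simp only [pvStepA]
      have e1 : ps + sg + pvC0 cup = (ps + pvC0 cup) + sg := by ring
      have e2 : pvPW phys i + sh - pvC1 cup = pvPW phys (i + 1) + sh := by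
        rw [pvPW_succ phys i hi, hcup]
        ring
      rw [e1, e2, hdrop (ps + pvC0 cup)]
    rw [hstA]
    -- B side, one step
    rw [PySem.List.enumerate_cons, List.foldl_cons]
    have hrest : ∀ x ∈ pvEvents W q d (((i : Nat) : Int) + 1) k' sh', x.1 ≠ ((i : Nat) : Int) := by
      intro x hx
      have := pvEvents_ge W q d k'.toNat k' rfl (((i : Nat) : Int) + 1) sh' x hx
      omega
    have hstB : pvReplay W (c ++ pvEvents W q d ((i : Nat) : Int) k sh) d
        (best, ps, ((c.length : Nat) : Int), sg, sh) (((i : Nat) : Int), cup)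
        = (if pvPW phys (i + 1) + sh' ≤ d then max best (ps + pvC0 cup + sg') else best,
           ps + pvC0 cup, ((c.length : Nat) : Int) + ((evAt.length : Nat) : Int), sg', sh') := by
      simp only [pvReplay]
      rw [hev, hcons c _ hrest, hW i hi]
    rw [hstB]
    have hlen2 : ((c.length : Nat) : Int) + ((evAt.length : Nat) : Int)
        = (((c ++ evAt).length : Nat) : Int) := by
      simp
    have hevfull : c ++ pvEvents W q d ((i : Nat) : Int) k sh
        = (c ++ evAt) ++ pvEvents W q d (((i : Nat) : Int) + 1) k' sh' := by
      rw [hev, List.append_assoc]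
    have hcast : ((i : Nat) : Int) + 1 = (((i + 1 : Nat) : Nat) : Int) := by push_cast; ring
    rw [hlen2, hevfull, hcast]
    exact ih (i + 1) ht' k' sg' sh' (ps + pvC0 cup)
      (if pvPW phys (i + 1) + sh' ≤ d then max best (ps + pvC0 cup + sg') else best) (c ++ evAt)

lemma pvRun_eq (d m : Int) (phys info : List (List Int)) :
    pvRunA d m phys info = pvRunB d m phys info := by
  simp only [pvRunA, pvRunB]
  rw [pvSum2, pvSum2B]
  have h0 : (0 : Int) + pvSig info = 0 + pvSig info := rfl
  have hmain := pvMain info d phys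
    ((phys.foldl (fun st cup => (st.1 ++ [st.2 - pvC1 cup], st.2 - pvC1 cup))
      (([] : List Int), (0 : Int))).1)
    (pvW_len phys) (fun i hi => pvW_getD phys i hi)
    phys 0 (by simp) m (0 + pvSig info) (0 - pvWid info) 0 0 []
  simp only [List.length_nil, Nat.cast_zero] at hmain
  have e1 : pvPW phys 0 + (0 - pvWid info) = 0 - pvWid info := by
    unfold pvPW
    simp
  rw [e1] at hmain
  have e2 : (0 : Int) + (0 + pvSig info) = 0 + pvSig info := by ring
  rw [e2] at hmain
  exact hmain

-- ===== VERDICT (by name: the statement is the Claim_ definition above) =====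
theorem maximize_total_significance_spec : Claim_equal_maximize_total_significance := by
  intro n m d pc ic _ _
  unfold Spec_maximize_total_significance
  unfold maximize_total_significance maximize_total_significance_alt
  exact pvRun_eq d m (pvSortRev (pvNegW pc n)) (pvSortRev (pvNegW ic m))
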